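-- pv_equiv track=rewrite | github.com/Julesc013/dominium | astro/views/orbit_view_engine.py | _children_by_parent
-- ===== SOURCE A (Python) =====
-- from typing import Dict, List, Mapping, Sequence
--
-- def _as_map(value: object) -> dict:
--     return dict(value or {}) if isinstance(value, Mapping) else {}
--
-- def _children_by_parent(body_rows_by_id: Mapping[str, dict]) -> Dict[str, list[str]]:
--     out: Dict[str, list[str]] = {}
--     for object_id, row in sorted(body_rows_by_id.items()):
--         parent_id = str(_as_map(row).get("relative_parent_object_id", "")).strip()
--         if not parent_id or parent_id == object_id:
--             continue
--         out.setdefault(parent_id, []).append(object_id)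
--     return dict((key, sorted(out[key])) for key in sorted(out.keys()))
-- ===== SOURCE B (Python) =====
-- def _children_by_parent(body_rows_by_id):
--     # One pass: collect (parent_id, object_id) pairs, sort the flat pair list once,
--     # then build the result dict by grouping consecutive runs of equal parent_id.
--     pairs = []
--     for object_id, row in body_rows_by_id.items():
--         parent_id = str((row or {}).get("relative_parent_object_id", "")).strip()
--         if parent_id and parent_id != object_id:
--             pairs.append((parent_id, object_id))
--     pairs.sort()
--     result = {}
--     cur_parent = None
--     cur_children = []
--     for parent_id, object_id in pairs:
--         if parent_id != cur_parent:
--             if cur_parent is not None: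
--                 result[cur_parent] = cur_children
--             cur_parent = parent_id
--             cur_children = []
--         cur_children.append(object_id)
--     if cur_parent is not None:
--         result[cur_parent] = cur_children
--     return result
-- ===== Notes on version B (the rewrite author's own statement) =====
-- stated objective: faster
-- what changed: Instead of building a dict of lists via setdefault over key-sorted items and then re-sorting every key list and every child list, B collects a flat (parent_id, object_id) pair list in one pass, sorts it once lexicographically, and groups consecutive runs of equal parent into the result dict.
import Mathlib
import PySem

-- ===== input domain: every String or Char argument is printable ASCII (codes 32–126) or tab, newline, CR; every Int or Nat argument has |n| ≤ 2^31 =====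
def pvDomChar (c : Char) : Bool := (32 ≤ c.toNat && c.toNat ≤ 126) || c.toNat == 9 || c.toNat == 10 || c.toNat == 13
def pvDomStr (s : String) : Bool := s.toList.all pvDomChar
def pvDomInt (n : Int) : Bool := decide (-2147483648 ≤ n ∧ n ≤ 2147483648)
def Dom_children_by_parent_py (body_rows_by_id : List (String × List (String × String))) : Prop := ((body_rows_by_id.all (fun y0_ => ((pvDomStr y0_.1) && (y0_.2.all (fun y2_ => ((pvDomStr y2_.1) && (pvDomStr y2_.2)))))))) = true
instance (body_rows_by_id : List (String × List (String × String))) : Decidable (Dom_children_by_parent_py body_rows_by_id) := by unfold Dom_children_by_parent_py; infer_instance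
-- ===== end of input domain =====

-- B replaces A's setdefault-dict-then-resort-everything construction by one flat
-- (parent, child) pair list, a single lexicographic sort, and consecutive-run grouping.

-- ===== PORT A =====
-- the dict argument arrives as an association list; PySem.Dict.ofList is its Python dict
-- (duplicate keys overwrite in place, exactly as dict construction does)
def children_by_parent_py (body_rows_by_id : List (String × List (String × String))) : List (String × List String) :=
  -- sorted(body_rows_by_id.items()): dict keys are distinct, so Python's tuple sort
  -- orders by the key alone and never compares the row dicts
  let sortedItems := PySem.List.sorted (PySem.Dict.ofList body_rows_by_id).items (fun p => p.1) false
  let out := sortedItems.foldl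
    (fun (d : PySem.Dict String (List String)) p =>
      -- str(_as_map(row).get("relative_parent_object_id", "")).strip(); rows are str→str dicts, so str() is the identity
      let parent_id := PySem.Str.strip ((PySem.Dict.ofList p.2).getD "relative_parent_object_id" "")
      if parent_id = "" ∨ parent_id = p.1 then d
      else d.modify parent_id [] (fun l => l ++ [p.1]))   -- out.setdefault(parent_id, []).append(object_id)
    PySem.Dict.empty
  (PySem.List.sorted out.keys (fun k => k) false).map
    (fun k => (k, PySem.List.sorted (out.getD k []) (fun c => c) false))

-- ===== PORT B =====
-- the loop state (cur_parent, cur_children, result) of Source B's grouping loop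
def pvStep (st : Option String × List String × List (String × List String)) (pc : String × String) :
    Option String × List String × List (String × List String) :=
  if some pc.1 ≠ st.1 then
    (some pc.1, [pc.2],
      st.2.2 ++ (match st.1 with | none => [] | some p => [(p, st.2.1)]))
  else (st.1, st.2.1 ++ [pc.2], st.2.2)

def children_by_parent_py_alt (body_rows_by_id : List (String × List (String × String))) : List (String × List String) :=
  let pairs := (PySem.Dict.ofList body_rows_by_id).items.foldl
    (fun acc p =>
      let parent_id := PySem.Str.strip ((PySem.Dict.ofList p.2).getD "relative_parent_object_id" "")
      if parent_id ≠ "" ∧ parent_id ≠ p.1 then acc ++ [(parent_id, p.1)] else acc) []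
  let sp := PySem.List.sorted2 pairs (fun p => p.1) (fun p => p.2) false   -- pairs.sort()
  let st := sp.foldl pvStep (none, [], [])
  st.2.2 ++ (match st.1 with | none => [] | some p => [(p, st.2.1)])       -- final flush

-- ===== PRECONDITION & SPEC =====
def Spec_children_by_parent_py (body_rows_by_id : List (String × List (String × String))) (out : List (String × List String)) : Prop := out = children_by_parent_py_alt body_rows_by_id
instance (body_rows_by_id : List (String × List (String × String))) (out : List (String × List String)) : Decidable (Spec_children_by_parent_py body_rows_by_id out) := by unfold Spec_children_by_parent_py; infer_instance

-- ===== CLAIM (what is proved, stated in full; the proofs are below) =====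
def Claim_equal_children_by_parent_py : Prop := ∀ (body_rows_by_id : List (String × List (String × String))), Dom_children_by_parent_py body_rows_by_id → Spec_children_by_parent_py body_rows_by_id (children_by_parent_py body_rows_by_id)

-- ===== LEMMAS AND PROOFS =====

def pvParent (row : List (String × String)) : String :=
  PySem.Str.strip ((PySem.Dict.ofList row).getD "relative_parent_object_id" "")
def pvPairs (items : List (String × List (String × String))) : List (String × String) :=
  items.filterMap (fun p => if pvParent p.2 ≠ "" ∧ pvParent p.2 ≠ p.1 then some (pvParent p.2, p.1) else none)

lemma pvA_fold_eq (items : List (String × List (String × String)))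
    (d : PySem.Dict String (List String)) :
    items.foldl
      (fun d p =>
        let parent_id := PySem.Str.strip ((PySem.Dict.ofList p.2).getD "relative_parent_object_id" "")
        if parent_id = "" ∨ parent_id = p.1 then d
        else d.modify parent_id [] (fun l => l ++ [p.1])) d
    = (pvPairs items).foldl (fun d p => d.modify p.1 [] (fun l => l ++ [p.2])) d := by
  induction items generalizing d with
  | nil => rfl
  | cons x xs ih =>
    simp only [List.foldl_cons, pvPairs, List.filterMap_cons]
    by_cases h : pvParent x.2 ≠ "" ∧ pvParent x.2 ≠ x.1
    · rw [if_pos h]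
      simp only [pvParent] at h
      rw [if_neg (by tauto)]
      simpa [pvPairs] using ih _
    · rw [if_neg h]
      simp only [pvParent] at h
      rw [if_pos (by tauto)]
      simpa [pvPairs] using ih d

lemma pvB_fold_eq (items : List (String × List (String × String)))
    (acc : List (String × String)) :
    items.foldl
      (fun acc p =>
        let parent_id := PySem.Str.strip ((PySem.Dict.ofList p.2).getD "relative_parent_object_id" "")
        if parent_id ≠ "" ∧ parent_id ≠ p.1 then acc ++ [(parent_id, p.1)] else acc) acc
    = acc ++ pvPairs items := by
  induction items generalizing acc with
  | nil => simp [pvPairs]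
  | cons x xs ih =>
    simp only [List.foldl_cons, pvPairs, List.filterMap_cons]
    by_cases h : pvParent x.2 ≠ "" ∧ pvParent x.2 ≠ x.1
    · rw [if_pos h]
      simp only [pvParent] at h
      rw [if_pos h, ih]
      simp [pvPairs, pvParent]
    · rw [if_neg h]
      simp only [pvParent] at h
      rw [if_neg h, ih]
      rfl

lemma pvPairs_perm {xs ys : List (String × List (String × String))} (h : xs.Perm ys) :
    (pvPairs xs).Perm (pvPairs ys) := h.filterMap _

lemma pv_sorted2_eq_sorted_lex (xs : List (String × String)) :
    PySem.List.sorted2 xs (fun p => p.1) (fun p => p.2) false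
      = PySem.List.sorted xs (fun p => toLex (p.1, p.2)) false := by
  show xs.foldl _ [] = xs.foldl _ []
  congr 1
  funext acc x
  congr 1
  funext a b
  show (decide (a.1 < b.1) || (!decide (b.1 < a.1) && decide (a.2 < b.2)))
      = decide (toLex (a.1, a.2) < toLex (b.1, b.2))
  rcases lt_trichotomy a.1 b.1 with h | h | h
  · simp [Prod.Lex.lt_iff, h]
  · simp [Prod.Lex.lt_iff, h]
  · have h1 : ¬ a.1 < b.1 := lt_asymm h
    have h2 : a.1 ≠ b.1 := ne_of_gt h
    simp [Prod.Lex.lt_iff, h, h1, h2]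

def pvF (ps : List (String × String)) (k : String) : List String :=
  PySem.List.sorted ((ps.filter (fun p => p.1 == k)).map (fun p => p.2)) (fun c => c) false
def pvKs (ps : List (String × String)) : List String :=
  PySem.List.sorted (PySem.Set.ofList (ps.map (fun p => p.1))) (fun k => k) false
def pvCanon (ps : List (String × String)) : List (String × List String) :=
  (pvKs ps).map (fun k => (k, pvF ps k))
lemma pvA_eq_canon (rows : List (String × List (String × String))) :
    children_by_parent_py rows
      = pvCanon (pvPairs (PySem.List.sorted (PySem.Dict.ofList rows).items (fun p => p.1) false)) := by
  unfold children_by_parent_py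
  simp only [pvA_fold_eq, PySem.Dict.keys_foldl_modify_key, PySem.Dict.getD_foldl_modify_append,
    PySem.Dict.getD_empty, PySem.Dict.keys_empty]
  rfl

lemma pvCanon_perm {ps qs : List (String × String)} (h : ps.Perm qs) :
    pvCanon ps = pvCanon qs := by
  have hKs : pvKs ps = pvKs qs := by
    apply PySem.List.sorted_eq_sorted_of_perm _ _ _ (fun a b hab => hab)
    rw [List.perm_ext_iff_of_nodup (PySem.Set.nodup_ofList _) (PySem.Set.nodup_ofList _)]
    intro a
    rw [PySem.Set.mem_ofList, PySem.Set.mem_ofList, (h.map _).mem_iff]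
  have hF : ∀ k, pvF ps k = pvF qs k := fun k =>
    PySem.List.sorted_eq_sorted_of_perm _ _ _ (fun a b hab => hab) ((h.filter _).map _)
  unfold pvCanon
  rw [hKs]
  exact List.map_congr_left fun k _ => by rw [hF k]

-- flatMap of per-key filters over a covering nodup key list is a permutation
lemma pv_flat_filter_perm (ks : List String) :
    ∀ (ps : List (String × String)), ks.Nodup → (∀ p ∈ ps, p.1 ∈ ks) →
    (ks.flatMap (fun k => ps.filter (fun p => p.1 == k))).Perm ps := by
  induction ks with
  | nil =>
    intro ps _ hcov
    have : ps = [] := List.eq_nil_iff_forall_not_mem.2 fun p hp => by simpa using hcov p hp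
    simp [this]
  | cons k ks ih =>
    intro ps hnd hcov
    rw [List.flatMap_cons]
    have hrest : ks.flatMap (fun k' => ps.filter (fun p => p.1 == k'))
        = ks.flatMap (fun k' => (ps.filter (fun p => !(p.1 == k))).filter (fun p => p.1 == k')) := by
      apply List.flatMap_congr
      intro k' hk'
      rw [List.filter_filter]
      apply List.filter_congr
      intro p _
      rcases hb : (p.1 == k') with _ | _
      · simp
      · have hpk : p.1 = k' := by simpa using hb
        have hk : ¬ p.1 = k := by
          intro he
          have : k ∈ ks := by rw [← he, hpk]; exact hk'
          exact (List.nodup_cons.1 hnd).1 this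
        simp [hk]
    rw [hrest]
    have hsub : ∀ p ∈ ps.filter (fun p => !(p.1 == k)), p.1 ∈ ks := by
      intro p hp
      rcases List.mem_filter.1 hp with ⟨hp1, hp2⟩
      rcases List.mem_cons.1 (hcov p hp1) with h | h
      · simp [h] at hp2
      · exact h
    have hperm := ih (ps.filter (fun p => !(p.1 == k))) (List.nodup_cons.1 hnd).2 hsub
    exact (hperm.append_left _).trans (List.filter_append_perm _ ps)

lemma pv_nodup_pvKs (ps : List (String × String)) : (pvKs ps).Nodup :=
  (PySem.List.sorted_perm _ _ _).symm.nodup (PySem.Set.nodup_ofList _)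

lemma pv_mem_pvKs {ps : List (String × String)} {k : String} :
    k ∈ pvKs ps ↔ ∃ p ∈ ps, p.1 = k := by
  unfold pvKs
  rw [PySem.List.mem_sorted, PySem.Set.mem_ofList, List.mem_map]

lemma pv_nodup_pvF {ps : List (String × String)} (hnd : (ps.map (fun p => p.2)).Nodup)
    (k : String) : (pvF ps k).Nodup := by
  have h1 : ((ps.filter (fun p => p.1 == k)).map (fun p => p.2)).Sublist (ps.map (fun p => p.2)) :=
    (List.filter_sublist).map _
  exact (PySem.List.sorted_perm _ _ _).symm.nodup (h1.nodup hnd)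

lemma pv_sorted_lex_eq_flat (ps : List (String × String)) (hnd : (ps.map (fun p => p.2)).Nodup) :
    PySem.List.sorted ps (fun p => toLex (p.1, p.2)) false
      = (pvKs ps).flatMap (fun k => (pvF ps k).map (fun c => (k, c))) := by
  apply PySem.List.sorted_eq_of_perm_of_pairwise_lt
  · -- permutation
    have hblock : ∀ k, ((pvF ps k).map (fun c => (k, c))).Perm (ps.filter (fun p => p.1 == k)) := by
      intro k
      have h1 : (pvF ps k).Perm ((ps.filter (fun p => p.1 == k)).map (fun p => p.2)) :=
        PySem.List.sorted_perm _ _ _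
      have h2 := h1.map (fun c => (k, c))
      rw [List.map_map] at h2
      have h3 : (ps.filter (fun p => p.1 == k)).map ((fun c => (k, c)) ∘ (fun p => p.2))
          = ps.filter (fun p => p.1 == k) := by
        have := List.map_congr_left (l := ps.filter (fun p => p.1 == k))
          (f := (fun c => (k, c)) ∘ (fun p => p.2)) (g := id) ?_
        · rw [this, List.map_id]
        · intro p hp
          have : p.1 = k := by simpa using (List.mem_filter.1 hp).2
          simp [Function.comp, ← this]
      rw [h3] at h2
      exact h2
    have h4 : ((pvKs ps).flatMap (fun k => (pvF ps k).map (fun c => (k, c)))).Perm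
        ((pvKs ps).flatMap (fun k => ps.filter (fun p => p.1 == k))) :=
      List.Perm.flatMap_left _ (fun k _ => hblock k)
    exact h4.trans (pv_flat_filter_perm _ ps (pv_nodup_pvKs ps)
      (fun p hp => pv_mem_pvKs.2 ⟨p, hp, rfl⟩))
  · -- pairwise strict lex
    rw [List.flatMap_def, List.pairwise_flatten]
    constructor
    · intro l hl
      rcases List.mem_map.1 hl with ⟨k, _, rfl⟩
      rw [List.pairwise_map]
      have hlt : (pvF ps k).Pairwise (· < ·) :=
        ((PySem.List.sorted_pairwise _ _).and (pv_nodup_pvF hnd k)).imp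
          (fun h => lt_of_le_of_ne h.1 h.2)
      exact hlt.imp (fun h => by
        rw [Prod.Lex.lt_iff]; right; exact ⟨rfl, h⟩)
    · rw [List.pairwise_map]
      have hks : (pvKs ps).Pairwise (· < ·) := PySem.List.sorted_ofList_pairwise_lt _
      refine hks.imp ?_
      intro k1 k2 hk x hx y hy
      rcases List.mem_map.1 hx with ⟨c1, _, rfl⟩
      rcases List.mem_map.1 hy with ⟨c2, _, rfl⟩
      rw [Prod.Lex.lt_iff]; left; exact hk

lemma pv_run (k : String) (cs : List String) :
    ∀ (lst : List String) (res : List (String × List String)),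
    (cs.map (fun c => (k, c))).foldl pvStep (some k, lst, res) = (some k, lst ++ cs, res) := by
  induction cs with
  | nil => intro lst res; simp
  | cons c cs ih =>
    intro lst res
    rw [List.map_cons, List.foldl_cons]
    have : pvStep (some k, lst, res) (k, c) = (some k, lst ++ [c], res) := by
      simp [pvStep]
    rw [this, ih]
    simp

lemma pv_group_main (ks : List String) (f : String → List String) :
    ∀ (cur : Option String) (lst : List String) (res : List (String × List String)),
    ks.Nodup → (∀ k ∈ ks, f k ≠ []) → (∀ k ∈ ks, cur ≠ some k) →
    (let st := (ks.flatMap (fun k => (f k).map (fun c => (k, c)))).foldl pvStep (cur, lst, res);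
     st.2.2 ++ (match st.1 with | none => [] | some p => [(p, st.2.1)]))
      = (res ++ (match cur with | none => [] | some p => [(p, lst)])) ++ ks.map (fun k => (k, f k)) := by
  induction ks with
  | nil => intro cur lst res _ _ _; simp
  | cons k ks ih =>
    intro cur lst res hnd hne hcur
    rw [List.flatMap_cons, List.foldl_append]
    rcases hfk : f k with _ | ⟨c, cs⟩
    · exact absurd hfk (hne k (List.mem_cons_self))
    · rw [List.map_cons, List.foldl_cons]
      have hne0 : some k ≠ cur := fun he => hcur k List.mem_cons_self he.symm
      have hstep : pvStep (cur, lst, res) (k, c)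
          = (some k, [c], res ++ (match cur with | none => [] | some p => [(p, lst)])) := by
        cases cur <;> simp_all [pvStep]
      rw [hstep, pv_run]
      have hcur' : ∀ k' ∈ ks, some k ≠ some k' := by
        intro k' hk' he
        exact (List.nodup_cons.1 hnd).1 (by rw [Option.some.injEq] at he; rw [he]; exact hk')
      rw [ih (some k) ([c] ++ cs) (res ++ _) (List.nodup_cons.1 hnd).2
        (fun k' hk' => hne k' (List.mem_cons_of_mem _ hk')) hcur']
      cases cur <;> simp [hfk]

lemma pv_group_flat (ks : List String) (f : String → List String)
    (hnd : ks.Nodup) (hne : ∀ k ∈ ks, f k ≠ []) :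
    (let st := (ks.flatMap (fun k => (f k).map (fun c => (k, c)))).foldl pvStep (none, [], []);
     st.2.2 ++ (match st.1 with | none => [] | some p => [(p, st.2.1)]))
      = ks.map (fun k => (k, f k)) := by
  rw [pv_group_main ks f none [] [] hnd hne (fun _ _ h => by cases h)]
  simp

lemma pv_pairs_snd_sublist (items : List (String × List (String × String))) :
    ((pvPairs items).map (fun p => p.2)).Sublist (items.map (fun p => p.1)) := by
  induction items with
  | nil => simp [pvPairs]
  | cons x xs ih =>
    simp only [pvPairs, List.filterMap_cons, List.map_cons]
    by_cases h : pvParent x.2 ≠ "" ∧ pvParent x.2 ≠ x.1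
    · rw [if_pos h]
      simpa [pvPairs] using (List.Sublist.cons₂ x.1 (by simpa [pvPairs] using ih))
    · rw [if_neg h]
      exact List.Sublist.cons x.1 (by simpa [pvPairs] using ih)

lemma pv_pvF_ne_nil {ps : List (String × String)} {k : String} (hk : k ∈ pvKs ps) :
    pvF ps k ≠ [] := by
  rcases pv_mem_pvKs.1 hk with ⟨p, hp, hpe⟩
  intro hnil
  unfold pvF at hnil
  rw [PySem.List.sorted_eq_nil_iff, List.map_eq_nil_iff, List.filter_eq_nil_iff] at hnil
  exact hnil p hp (by simp [hpe])

lemma pvB_eq_canon (rows : List (String × List (String × String))) :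
    children_by_parent_py_alt rows = pvCanon (pvPairs (PySem.Dict.ofList rows).items) := by
  have hnd : ((pvPairs (PySem.Dict.ofList rows).items).map (fun p => p.2)).Nodup := by
    refine (pv_pairs_snd_sublist _).nodup ?_
    simpa [PySem.Dict.keys] using PySem.Dict.nodup_keys_ofList rows
  unfold children_by_parent_py_alt
  simp only [pvB_fold_eq, List.nil_append, pv_sorted2_eq_sorted_lex]
  rw [pv_sorted_lex_eq_flat _ hnd]
  exact pv_group_flat _ _ (pv_nodup_pvKs _) (fun k hk => pv_pvF_ne_nil hk)

-- ===== VERDICT (by name: the statement is the Claim_ definition above) =====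
theorem children_by_parent_py_spec : Claim_equal_children_by_parent_py := by
  intro rows _
  show children_by_parent_py rows = children_by_parent_py_alt rows
  rw [pvA_eq_canon, pvB_eq_canon]
  exact pvCanon_perm (pvPairs_perm (PySem.List.sorted_perm _ _ _))
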